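-- pv_equiv track=rewrite | github.com/Esha0011/PYTHON | HillServer.py | numericEncoding
-- ===== SOURCE A (Python) =====
-- def textToMatrix(n, text):
--     l2 = []
--     for i in range(n):
--         l = []
--         for j in range(len(text)):
--             if (j % n == i): l.append(text[j])
--         l2.append(l)
--     return l2
--
-- def matProcess(n, l2):
--     for i in l2[1:n + 1]:
--         k = len(l2[0]) - len(i)
--         if (k != 0):
--             i.extend(k * "x")
--     return l2
--
-- def numericEncoding(text, order):
--     l2 = textToMatrix(order, text)
--     l2 = matProcess(order, l2)
--     a1 = "abcdefghijklmnopqrstuvwxyz"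
--     for i in range(len(l2)):
--         for j in range(len(l2[0])):
--             l2[i][j] = a1.index(l2[i][j].lower())
--     return l2
-- ===== SOURCE B (Python) =====
-- def numericEncoding(text, order):
--     if order <= 0:
--         return []
--     rows = [[] for _ in range(order)]
--     for j, c in enumerate(text):
--         rows[j % order].append((ord(c) | 32) - 97)
--     w = len(rows[0])
--     for r in rows[1:]:
--         r.extend([23] * (w - len(r)))
--     return rows
-- ===== Notes on version B (the rewrite author's own statement) =====
-- stated objective: faster
-- what changed: B makes a single bucketing pass over enumerate(text) (rows[j % order].append) with direct arithmetic char codes ((ord(c)|32)-97) instead of A's one full rescan of the text per row plus a linear a1.index search per character.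
import Mathlib
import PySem

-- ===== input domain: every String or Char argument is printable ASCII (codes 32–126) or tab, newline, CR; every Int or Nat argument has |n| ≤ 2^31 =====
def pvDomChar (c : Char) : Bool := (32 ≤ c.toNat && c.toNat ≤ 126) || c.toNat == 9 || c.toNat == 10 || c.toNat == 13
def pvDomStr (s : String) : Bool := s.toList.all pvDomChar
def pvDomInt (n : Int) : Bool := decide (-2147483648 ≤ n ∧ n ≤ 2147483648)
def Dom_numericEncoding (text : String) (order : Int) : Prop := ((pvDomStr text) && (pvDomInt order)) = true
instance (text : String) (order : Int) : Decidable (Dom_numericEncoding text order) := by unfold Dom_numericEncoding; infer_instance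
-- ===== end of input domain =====

-- B replaces A's per-row rescans of the text (order × len(text) work) by a single bucketing
-- pass over enumerate(text) with direct arithmetic char codes; objective: faster (asymptotic).


-- ===== PORT A =====
def pvAlphabet : List Char := "abcdefghijklmnopqrstuvwxyz".toList

-- a1.index(c.lower()); `none` is Python's ValueError, excluded by Pre_numericEncoding
def pvA1Index (c : Char) : Int :=
  match PySem.List.index? pvAlphabet (PySem.Chars.lowerChar c) with
  | some k => (k : Int)
  | none => 0

def textToMatrix (n : Int) (text : List Char) : List (List Char) :=
  (PySem.List.pyRange 0 n 1).foldl (fun l2 i =>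
    l2 ++ [(PySem.List.pyRange 0 (text.length : Int) 1).foldl (fun l j =>
      if PySem.Int.mod j n = i then l ++ [PySem.List.pyGetD text j ' '] else l) []]) []

-- the rows of the slice l2[1:n+1] are extended in place; k*"x" with k ≤ 0 is "" (Int.toNat clamps)
def matProcess (n : Int) (l2 : List (List Char)) : List (List Char) :=
  match l2 with
  | [] => l2
  | h :: _ =>
    h :: (PySem.List.slice l2 (some 1) (some (n + 1))).map (fun i =>
      let k : Int := (h.length : Int) - (i.length : Int)
      if k ≠ 0 then i ++ List.replicate k.toNat 'x' else i)

-- the in-place assignments l2[i][j] = a1.index(l2[i][j].lower()) over j in range(len(l2[0]))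
-- are ported as per-row reconstruction (the Python list changes element type in place)
def numericEncoding (text : String) (order : Int) : List (List Int) :=
  let l2 := matProcess order (textToMatrix order text.toList)
  l2.map (fun row =>
    (PySem.List.pyRange 0 ((l2.headD []).length : Int) 1).foldl
      (fun acc j => acc ++ [pvA1Index (PySem.List.pyGetD row j ' ')]) [])

-- ===== PORT B =====
-- (ord(c) | 32) - 97
def pvVal (c : Char) : Int := ((c.toNat ||| 32 : Nat) : Int) - 97

def numericEncoding_alt (text : String) (order : Int) : List (List Int) :=
  if order ≤ 0 then []
  else
    let rows := (PySem.List.enumerate text.toList 0).foldl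
      (fun rows jc =>
        PySem.List.pySetD rows (PySem.Int.mod jc.1 order)
          (PySem.List.pyGetD rows (PySem.Int.mod jc.1 order) [] ++ [pvVal jc.2]))
      (List.replicate order.toNat [])
    match rows with
    | [] => []  -- unreachable: order > 0 gives order.toNat > 0 buckets
    | r0 :: rest => r0 :: rest.map (fun r => r ++ List.replicate (r0.length - r.length) (23 : Int))

-- ===== PRECONDITION & SPEC =====
-- Pre_ excludes exactly the inputs on which A raises ValueError: with order ≥ 1,
-- a text character whose lowercase is not one of 'a'..'z' makes a1.index raise.
def Pre_numericEncoding (text : String) (order : Int) : Prop :=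
  0 < order → text.toList.all PySem.Chars.isalpha = true
instance (text : String) (order : Int) : Decidable (Pre_numericEncoding text order) := by
  unfold Pre_numericEncoding; infer_instance

def pvWitness_numericEncoding : String × Int := ("Hello", 2)

def Spec_numericEncoding (text : String) (order : Int) (out : List (List Int)) : Prop := out = numericEncoding_alt text order
instance (text : String) (order : Int) (out : List (List Int)) : Decidable (Spec_numericEncoding text order out) := by unfold Spec_numericEncoding; infer_instance

-- ===== CLAIM (what is proved, stated in full; the proofs are below) =====
def Claim_equal_numericEncoding : Prop := ∀ (text : String) (order : Int), Dom_numericEncoding text order → Pre_numericEncoding text order → Spec_numericEncoding text order (numericEncoding text order)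

-- ===== LEMMAS AND PROOFS =====

-- characterisation of A's inner row: the characters of cs whose position is ≡ k (mod n)
theorem pv_rowA (n k : Nat) (cs : List Char) :
    (PySem.List.pyRange 0 (cs.length : Int) 1).foldl
      (fun l j => if PySem.Int.mod j (n : Int) = (k : Int) then l ++ [PySem.List.pyGetD cs j ' '] else l) []
    = ((cs.zipIdx 0).filter (fun p => decide (p.2 % n = k))).map (·.1) := by
  induction cs using List.reverseRecOn with
  | nil => simp [PySem.List.pyRange_one_eq_nil]
  | append_singleton cs c ih =>
    have hlen : ((cs ++ [c]).length : Int) = (cs.length : Int) + 1 := by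
      simp
    rw [hlen, PySem.List.pyRange_one_succ_right (by positivity), List.foldl_append]
    have hcongr : (PySem.List.pyRange 0 (cs.length : Int) 1).foldl
        (fun l j => if PySem.Int.mod j (n : Int) = (k : Int) then l ++ [PySem.List.pyGetD (cs ++ [c]) j ' '] else l) ([] : List Char)
      = (PySem.List.pyRange 0 (cs.length : Int) 1).foldl
        (fun l j => if PySem.Int.mod j (n : Int) = (k : Int) then l ++ [PySem.List.pyGetD cs j ' '] else l) [] := by
      apply PySem.List.foldl_congr_mem
      intro acc j hj
      rw [PySem.List.mem_pyRange_one] at hj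
      have h0 : PySem.List.pyGetD (cs ++ [c]) j ' ' = PySem.List.pyGetD cs j ' ' := by
        rw [PySem.List.pyGetD_of_nonneg _ _ hj.1, PySem.List.pyGetD_of_nonneg _ _ hj.1]
        have hm : j.toNat < cs.length := by omega
        simp [List.getD, List.getElem?_append_left hm]
      rw [h0]
    rw [hcongr, ih]
    have hget : PySem.List.pyGetD (cs ++ [c]) (cs.length : Int) ' ' = c := by
      rw [PySem.List.pyGetD_natCast]
      simp [List.getD]
    have hmod : (PySem.Int.mod (cs.length : Int) (n : Int) = (k : Int)) ↔ cs.length % n = k := by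
      rw [PySem.Int.mod_natCast]; exact_mod_cast Int.natCast_inj
    simp only [List.foldl_cons, List.foldl_nil, List.zipIdx_append, List.filter_append, List.map_append]
    simp only [List.zipIdx_cons, List.zipIdx_nil, Nat.zero_add]
    by_cases h : cs.length % n = k
    · rw [if_pos (hmod.mpr h), hget]
      simp [h]
    · rw [if_neg (fun hc => h (hmod.mp hc))]
      simp [h]

-- characterisation of B's bucketing fold
theorem pv_foldB (n : Nat) (cs : List Char) : ∀ (s : Nat) (rows : List (List Int)), rows.length = n →
    (List.foldl (fun rows jc =>
        PySem.List.pySetD rows (PySem.Int.mod jc.1 (n : Int))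
          (PySem.List.pyGetD rows (PySem.Int.mod jc.1 (n : Int)) [] ++ [pvVal jc.2]))
      rows (PySem.List.enumerate cs (s : Int))).length = n ∧
    ∀ k, k < n →
      (List.foldl (fun rows jc =>
          PySem.List.pySetD rows (PySem.Int.mod jc.1 (n : Int))
            (PySem.List.pyGetD rows (PySem.Int.mod jc.1 (n : Int)) [] ++ [pvVal jc.2]))
        rows (PySem.List.enumerate cs (s : Int))).getD k []
      = rows.getD k [] ++ ((cs.zipIdx s).filter (fun p => decide (p.2 % n = k))).map (fun p => pvVal p.1) := by
  induction cs with
  | nil => intro s rows hr; simp [PySem.List.enumerate_nil, hr]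
  | cons c cs ih =>
    intro s rows hr
    rw [PySem.List.enumerate_cons, List.foldl_cons]
    have hs1 : (s : Int) + 1 = ((s + 1 : Nat) : Int) := by push_cast; ring
    have hmod : PySem.Int.mod (s : Int) (n : Int) = ((s % n : Nat) : Int) := PySem.Int.mod_natCast s n
    set rows1 := PySem.List.pySetD rows (PySem.Int.mod (s : Int) (n : Int))
        (PySem.List.pyGetD rows (PySem.Int.mod (s : Int) (n : Int)) [] ++ [pvVal c]) with hrows1
    have hr1 : rows1 = rows.set (s % n) (rows.getD (s % n) [] ++ [pvVal c]) := by
      rw [hrows1, hmod, PySem.List.pySetD_natCast, PySem.List.pyGetD_natCast]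
    have hlen1 : rows1.length = n := by rw [hr1]; simp [hr]
    obtain ⟨hlA, hlB⟩ := ih (s + 1) rows1 hlen1
    rw [hs1]
    constructor
    · exact hlA
    · intro k hk
      rw [hlB k hk]
      have hget1 : rows1.getD k [] = if s % n = k then rows.getD k [] ++ [pvVal c] else rows.getD k [] := by
        rw [hr1]
        simp only [List.getD, List.getElem?_set]
        split_ifs with h1 h2
        · subst h1; simp [hr, hk]
        · omega
        · rfl
      rw [hget1, List.zipIdx_cons, List.filter_cons]
      by_cases h : s % n = k
      · simp [h, List.append_assoc]
      · simp [h]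

-- size of bucket k
theorem pv_bucketLen (n k : Nat) (hn : 0 < n) (hk : k < n) (cs : List Char) :
    ((cs.zipIdx 0).filter (fun p => decide (p.2 % n = k))).length
    = cs.length / n + if k < cs.length % n then 1 else 0 := by
  induction cs using List.reverseRecOn with
  | nil => simp [Nat.div_eq_of_lt hn, Nat.mod_eq_of_lt hn]
  | append_singleton cs c ih =>
    rw [List.zipIdx_append, List.filter_append, List.length_append, ih]
    set L := cs.length with hL
    have hsplit : (L + 1) / n = L / n + (L % n + 1) / n ∧ (L + 1) % n = (L % n + 1) % n := by
      constructor
      · conv_lhs => rw [← Nat.div_add_mod L n]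
        rw [Nat.add_assoc, Nat.mul_add_div hn]
      · conv_lhs => rw [← Nat.div_add_mod L n]
        rw [Nat.add_assoc, Nat.mul_add_mod]
    have hlast : ((([c].zipIdx (0 + L)).filter (fun p => decide (p.2 % n = k))).length)
        = if L % n = k then 1 else 0 := by
      simp only [List.zipIdx_cons, List.zipIdx_nil, Nat.zero_add]
      by_cases h : L % n = k <;> simp [h]
    rw [hlast]
    simp only [List.length_append, List.length_cons, List.length_nil]
    have hrm : L % n < n := Nat.mod_lt _ hn
    by_cases hend : L % n + 1 = n
    · have h1 : (L % n + 1) / n = 1 := by rw [hend]; exact Nat.div_self hn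
      have h2 : (L % n + 1) % n = 0 := by rw [hend]; exact Nat.mod_self n
      rw [hsplit.1, hsplit.2, h1, h2]
      split_ifs <;> omega
    · have h1 : (L % n + 1) / n = 0 := Nat.div_eq_of_lt (by omega)
      have h2 : (L % n + 1) % n = L % n + 1 := Nat.mod_eq_of_lt (by omega)
      rw [hsplit.1, hsplit.2, h1, h2]
      split_ifs <;> omega

theorem pv_alphaIdx (c : Char) (h : PySem.Chars.isalpha c = true) : pvA1Index c = pvVal c := by
  have hb : (65 ≤ c.toNat ∧ c.toNat ≤ 90) ∨ (97 ≤ c.toNat ∧ c.toNat ≤ 122) := by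
    simp only [PySem.Chars.isalpha, PySem.Chars.isupper, PySem.Chars.islower, Bool.or_eq_true,
      Bool.and_eq_true, decide_eq_true_eq] at h
    rcases h with ⟨h1, h2⟩ | ⟨h1, h2⟩
    · left; exact ⟨h1, h2⟩
    · right; exact ⟨h1, h2⟩
  have hc : c = Char.ofNat c.toNat := (Char.ofNat_toNat c).symm
  rw [hc]
  rcases hb with ⟨h1, h2⟩ | ⟨h1, h2⟩ <;> interval_cases (c.toNat) <;> decide

-- ===== VERDICT (by name: the statement is the Claim_ definition above) =====
theorem numericEncoding_spec : Claim_equal_numericEncoding := by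
  intro text order _hdom hpre
  unfold Spec_numericEncoding
  by_cases hord : order ≤ 0
  · simp [numericEncoding, numericEncoding_alt, textToMatrix, matProcess,
      PySem.List.pyRange_one_eq_nil hord, hord]
  · rw [Int.not_le] at hord
    set cs := text.toList with hcs
    set N := order.toNat with hNdef
    have hN : 0 < N := by omega
    have hcast : (N : Int) = order := Int.toNat_of_nonneg (by omega)
    have halpha : ∀ c ∈ cs, PySem.Chars.isalpha c = true := by
      have := hpre hord
      simpa [List.all_eq_true] using this
    -- abbreviations
    set bkt := fun k => ((cs.zipIdx 0).filter (fun p => decide (p.2 % N = k))).map (·.1) with hbkt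
    set chunk := fun k => ((cs.zipIdx 0).filter (fun p => decide (p.2 % N = k))).map
      (fun p => pvVal p.1) with hchunk
    have hbridge : ∀ k, (bkt k).map pvA1Index = chunk k := by
      intro k
      rw [hbkt, hchunk, List.map_map]
      apply List.map_congr_left
      intro p hp
      have hp' := List.mem_of_mem_filter hp
      obtain ⟨x, i⟩ := p
      have hmem := List.mem_zipIdx hp'
      have : x ∈ cs := by
        rcases hmem with ⟨-, hi, hx⟩
        rw [hx]; exact List.getElem_mem _
      exact pv_alphaIdx x (halpha x this)
    have hlenbe : ∀ k, (bkt k).length = (chunk k).length := by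
      intro k; rw [hbkt, hchunk]; simp
    set w := (bkt 0).length with hw
    have hwlen : ∀ k, k < N → (bkt k).length ≤ w := by
      intro k hk
      have h1 : (bkt k).length = cs.length / N + if k < cs.length % N then 1 else 0 := by
        rw [hbkt]; rw [List.length_map]; exact pv_bucketLen N k hN hk cs
      have h2 : (bkt 0).length = cs.length / N + if 0 < cs.length % N then 1 else 0 := by
        rw [hbkt]; rw [List.length_map]; exact pv_bucketLen N 0 hN hN cs
      rw [hw, h1, h2]; split_ifs <;> omega
    -- A side: textToMatrix
    have hrange : PySem.List.pyRange 0 order 1 = (List.range N).map (fun k : Nat => (k : Int)) := by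
      rw [PySem.List.pyRange_one]
      simp only [Int.sub_zero, zero_add, ← hNdef]
    have hA1 : textToMatrix order cs = (List.range N).map bkt := by
      rw [textToMatrix, hrange, PySem.List.foldl_append_singleton_eq_map, List.nil_append,
        List.map_map]
      apply List.map_congr_left
      intro k _
      show (PySem.List.pyRange 0 (cs.length : Int) 1).foldl _ [] = bkt k
      rw [← hcast, hbkt]
      exact pv_rowA N k cs
    obtain ⟨m, hm⟩ : ∃ m, N = m + 1 := ⟨N - 1, by omega⟩
    have hsplitN : (List.range N).map bkt = bkt 0 :: (List.range m).map (fun i => bkt (i + 1)) := by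
      rw [hm, List.range_succ_eq_map, List.map_cons, List.map_map]
      rfl
    -- A side: matProcess
    have hA2 : matProcess order (textToMatrix order cs)
        = bkt 0 :: (List.range m).map (fun i => bkt (i + 1) ++
            List.replicate (w - (bkt (i + 1)).length) 'x') := by
      rw [hA1, hsplitN, matProcess]
      have hslice : PySem.List.slice (bkt 0 :: (List.range m).map (fun i => bkt (i + 1)))
          (some 1) (some (order + 1)) = (List.range m).map (fun i => bkt (i + 1)) := by
        have : order + 1 = ((N + 1 : Nat) : Int) := by push_cast [hcast]; ring
        rw [this, show ((1:Int)) = ((1:Nat):Int) from rfl, PySem.List.slice_natCast]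
        simp [List.take_of_length_le, hm]
      rw [hslice, List.map_map]
      congr 1
      apply List.map_congr_left
      intro i _
      show (if ((w : Int) - ((bkt (i+1)).length : Int)) ≠ 0 then
          bkt (i+1) ++ List.replicate ((w : Int) - ((bkt (i+1)).length : Int)).toNat 'x'
        else bkt (i+1)) = _
      split_ifs with hz
      · rw [Int.toNat_sub]
      · have : (bkt (i+1)).length = w := by omega
        simp [this]
    -- A side: encoding
    have hA3 : numericEncoding text order
        = (bkt 0).map pvA1Index :: (List.range m).map (fun i =>
            (bkt (i + 1)).map pvA1Index ++ List.replicate (w - (bkt (i + 1)).length) 23) := by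
      rw [numericEncoding, ← hcs, hA2]
      have hhead : ((bkt 0 :: (List.range m).map (fun i => bkt (i + 1) ++
          List.replicate (w - (bkt (i + 1)).length) 'x')).headD []).length = w := rfl
      rw [hhead]
      have henc : ∀ row : List Char, row.length = w →
          (PySem.List.pyRange 0 (w : Int) 1).foldl
            (fun acc j => acc ++ [pvA1Index (PySem.List.pyGetD row j ' ')]) [] = row.map pvA1Index := by
        intro row hrow
        rw [← hrow, PySem.List.foldl_pyRange_zero_pyGetD' row ' ' (fun acc c => acc ++ [pvA1Index c]) [],
          PySem.List.foldl_append_singleton_eq_map, List.nil_append]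
      rw [List.map_cons, henc (bkt 0) rfl]
      congr 1
      rw [List.map_map]
      apply List.map_congr_left
      intro i hi
      have hlen : (bkt (i + 1) ++ List.replicate (w - (bkt (i + 1)).length) 'x').length = w := by
        have : (bkt (i + 1)).length ≤ w := hwlen (i + 1) (by rw [hm]; simpa using List.mem_range.mp hi)
        simp; omega
      show (PySem.List.pyRange 0 (w : Int) 1).foldl _ [] = _
      rw [henc _ hlen, List.map_append, List.map_replicate,
        show pvA1Index 'x' = (23 : Int) from by decide]
    -- B side
    have hB : numericEncoding_alt text order
        = chunk 0 :: (List.range m).map (fun i =>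
            chunk (i + 1) ++ List.replicate ((chunk 0).length - (chunk (i + 1)).length) 23) := by
      rw [numericEncoding_alt, if_neg (by omega), ← hcs]
      obtain ⟨hlenres, hgetres⟩ := pv_foldB N cs 0 (List.replicate N [])
        (by simp) |>.imp id id
      set res := (PySem.List.enumerate cs ((0 : Nat) : Int)).foldl
        (fun rows jc => PySem.List.pySetD rows (PySem.Int.mod jc.1 (N : Int))
          (PySem.List.pyGetD rows (PySem.Int.mod jc.1 (N : Int)) [] ++ [pvVal jc.2]))
        (List.replicate N []) with hres
      have hres' : (PySem.List.enumerate cs 0).foldl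
          (fun rows jc => PySem.List.pySetD rows (PySem.Int.mod jc.1 order)
            (PySem.List.pyGetD rows (PySem.Int.mod jc.1 order) [] ++ [pvVal jc.2]))
          (List.replicate order.toNat []) = res := by
        rw [hres, ← hcast]
        norm_num
      have hreseq : res = (List.range N).map chunk := by
        apply List.ext_getElem
        · simp [hlenres]
        · intro k hk1 hk2
          have hkN : k < N := by rwa [hlenres] at hk1
          have h1 : res[k] = res.getD k [] := (List.getD_eq_getElem res [] hk1).symm
          rw [h1, hgetres k hkN]
          simp [hchunk]
      have hsplit2 : (List.range N).map chunk
          = chunk 0 :: (List.range m).map (fun i => chunk (i + 1)) := by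
        rw [hm, List.range_succ_eq_map, List.map_cons, List.map_map]
        rfl
      rw [hres', hreseq, hsplit2]
      show chunk 0 :: List.map (fun r => r ++ List.replicate ((chunk 0).length - r.length) 23)
          (List.map (fun i => chunk (i + 1)) (List.range m)) = _
      rw [List.map_map]
      rfl
    -- combine
    rw [hA3, hB]
    have hw0 : (chunk 0).length = w := by rw [hw, hlenbe]
    congr 1
    · exact hbridge 0
    · apply List.map_congr_left
      intro i _
      rw [hbridge (i + 1), hw0, hlenbe (i + 1)]
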